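-- pv_equiv track=rewrite | github.com/Armotik/fog-rml | src/pyhartig/mapping/MappingParser.py | _is_simple_identifier
-- ===== SOURCE A (Python) =====
-- def _is_simple_identifier(value: str) -> bool:
--     """
--     Checks if the given string is a simple identifier (matches [A-Za-z_][A-Za-z0-9_-]*)
--     :param value: The string to check
--     :return: True if the string is a simple identifier, False otherwise
--     """
--     if not value:
--         return False
--     first_chars = "ABCDEFGHIJKLMNOPQRSTUVWXYZabcdefghijklmnopqrstuvwxyz_"
--     rest_chars = first_chars + "0123456789-"
--     if value[0] not in first_chars:
--         return False
--     return all(ch in rest_chars for ch in value[1:])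
-- ===== SOURCE B (Python) =====
-- import re
--
-- _IDENT_RE = re.compile(r'[A-Za-z_][A-Za-z0-9_-]*')
--
-- def _is_simple_identifier(value: str) -> bool:
--     """True iff value fully matches [A-Za-z_][A-Za-z0-9_-]*."""
--     return bool(_IDENT_RE.fullmatch(value))
-- ===== Notes on version B (the rewrite author's own statement) =====
-- stated objective: idiomatic
-- what changed: Replaced the manual first-character set test and all()-loop over two literal character-set strings with a single precompiled re.fullmatch of the pattern the docstring already names.
import Mathlib
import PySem

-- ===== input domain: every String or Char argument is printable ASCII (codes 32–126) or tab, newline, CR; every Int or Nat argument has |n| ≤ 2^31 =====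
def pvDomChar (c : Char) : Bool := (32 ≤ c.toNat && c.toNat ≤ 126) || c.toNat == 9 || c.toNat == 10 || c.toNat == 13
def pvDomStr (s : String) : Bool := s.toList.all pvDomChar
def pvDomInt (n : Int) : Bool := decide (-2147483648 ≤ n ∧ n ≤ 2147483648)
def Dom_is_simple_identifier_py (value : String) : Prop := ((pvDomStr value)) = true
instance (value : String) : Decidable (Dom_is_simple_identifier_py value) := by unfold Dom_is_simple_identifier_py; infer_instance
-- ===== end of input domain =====

-- B replaces A's manual membership tests in two literal character-set strings and its all() loop
-- by a single regex fullmatch of [A-Za-z_][A-Za-z0-9_-]*; objective: idiomatic (same O(n) cost).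

-- ===== PORT A =====
-- the string constants first_chars / rest_chars, used only for `ch in …` membership, as their character lists
def pvFirstChars : List Char := ['A','B','C','D','E','F','G','H','I','J','K','L','M','N','O','P','Q','R','S','T','U','V','W','X','Y','Z','a','b','c','d','e','f','g','h','i','j','k','l','m','n','o','p','q','r','s','t','u','v','w','x','y','z','_']
def pvRestChars : List Char := pvFirstChars ++ ['0','1','2','3','4','5','6','7','8','9','-']

-- A: empty → False; value[0] must be in first_chars; then all(ch in rest_chars for ch in value[1:])
def is_simple_identifier_py (value : String) : Bool :=
  match value.toList with
  | [] => false
  | c :: rest =>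
    if !(pvFirstChars.contains c) then false
    else rest.all (fun ch => pvRestChars.contains ch)

-- ===== PORT B =====
-- B: re.fullmatch(r'[A-Za-z_][A-Za-z0-9_-]*', value). The regex engine's run on this pattern is:
-- consume one char of the first class, then greedily chars of the second class, and require end of input.
def pvReFirstClass (c : Char) : Bool := ('A' ≤ c && c ≤ 'Z') || ('a' ≤ c && c ≤ 'z') || c == '_'
def pvReRestClass (c : Char) : Bool := pvReFirstClass c || ('0' ≤ c && c ≤ '9') || c == '-'
-- the star loop: consume while in class, succeed iff the whole input is consumed
def pvReStarRun : List Char → Bool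
  | [] => true
  | c :: cs => pvReRestClass c && pvReStarRun cs
def is_simple_identifier_py_alt (value : String) : Bool :=
  match value.toList with
  | [] => false
  | c :: cs => pvReFirstClass c && pvReStarRun cs

-- ===== PRECONDITION & SPEC =====
def Spec_is_simple_identifier_py (value : String) (out : Bool) : Prop := out = is_simple_identifier_py_alt value
instance (value : String) (out : Bool) : Decidable (Spec_is_simple_identifier_py value out) := by unfold Spec_is_simple_identifier_py; infer_instance

-- ===== CLAIM (what is proved, stated in full; the proofs are below) =====
def Claim_equal_is_simple_identifier_py : Prop := ∀ (value : String), Dom_is_simple_identifier_py value → Spec_is_simple_identifier_py value (is_simple_identifier_py value)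

-- ===== LEMMAS AND PROOFS =====
set_option maxRecDepth 8000 in
theorem pv_first_eq (c : Char) : pvFirstChars.contains c = pvReFirstClass c := by
  simp only [pvFirstChars, pvReFirstClass, List.contains_cons, List.contains_nil, Bool.or_false]
  rw [Bool.eq_iff_iff]
  simp only [Bool.or_eq_true, Bool.and_eq_true, beq_iff_eq, decide_eq_true_eq, Char.le_def,
    Char.ext_iff, UInt32.le_iff_toNat_le, ← UInt32.toNat_inj]
  norm_num
  simp only [show ('A' : Char).toNat = 65 from rfl, show ('B' : Char).toNat = 66 from rfl, show ('C' : Char).toNat = 67 from rfl, show ('D' : Char).toNat = 68 from rfl, show ('E' : Char).toNat = 69 from rfl, show ('F' : Char).toNat = 70 from rfl, show ('G' : Char).toNat = 71 from rfl, show ('H' : Char).toNat = 72 from rfl, show ('I' : Char).toNat = 73 from rfl, show ('J' : Char).toNat = 74 from rfl, show ('K' : Char).toNat = 75 from rfl, show ('L' : Char).toNat = 76 from rfl, show ('M' : Char).toNat = 77 from rfl, show ('N' : Char).toNat = 78 from rfl, show ('O' : Char).toNat = 79 from rfl, show ('P' : Char).toNat = 80 from rfl, show ('Q' : Char).toNat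 = 81 from rfl, show ('R' : Char).toNat = 82 from rfl, show ('S' : Char).toNat = 83 from rfl, show ('T' : Char).toNat = 84 from rfl, show ('U' : Char).toNat = 85 from rfl, show ('V' : Char).toNat = 86 from rfl, show ('W' : Char).toNat = 87 from rfl, show ('X' : Char).toNat = 88 from rfl, show ('Y' : Char).toNat = 89 from rfl, show ('Z' : Char).toNat = 90 from rfl, show ('a' : Char).toNat = 97 from rfl, show ('b' : Char).toNat = 98 from rfl, show ('c' : Char).toNat = 99 from rfl, show ('d' : Char).toNat = 100 from rfl, show ('e' : Char).toNat = 101 from rfl, show ('f' : Char).toNat = 102 from rfl, show ('g' : Char).toNat = 103 from rfl, show ('h' : Char).toNat = 104 from rfl, show ('i' : Char).toNat = 105 from rfl, show ('j' : Char).toNat = 106 from rfl, show ('k' : Char).toNat = 107 from rfl, show ('l' : Char).toNat = 108 from rfl, show ('m' : Char).toNat = 109 from rfl, show ('n' : Char).toNat = 110 from rfl, show ('o' : Char).toNat = 111 from rfl, show ('p' : Char).toNat = 112 from rfl, show ('q' : Char).toNat = 113 from rfl, show ('r' : Char).toNat = 114 from rfl, show ('s' : Char).toNat = 115 from rfl,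 show ('t' : Char).toNat = 116 from rfl, show ('u' : Char).toNat = 117 from rfl, show ('v' : Char).toNat = 118 from rfl, show ('w' : Char).toNat = 119 from rfl, show ('x' : Char).toNat = 120 from rfl, show ('y' : Char).toNat = 121 from rfl, show ('z' : Char).toNat = 122 from rfl, show ('_' : Char).toNat = 95 from rfl, show ('0' : Char).toNat = 48 from rfl, show ('1' : Char).toNat = 49 from rfl, show ('2' : Char).toNat = 50 from rfl, show ('3' : Char).toNat = 51 from rfl, show ('4' : Char).toNat = 52 from rfl, show ('5' : Char).toNat = 53 from rfl, show ('6' : Char).toNat = 54 from rfl, show ('7' : Char).toNat = 55 from rfl, show ('8' : Char).toNat = 56 from rfl, show ('9' : Char).toNat = 57 from rfl, show ('-' : Char).toNat = 45 from rfl]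
  omega

set_option maxRecDepth 8000 in
theorem pv_rest_eq (c : Char) : pvRestChars.contains c = pvReRestClass c := by
  simp only [pvRestChars, pvFirstChars, pvReRestClass, pvReFirstClass, List.cons_append,
    List.nil_append, List.contains_cons, List.contains_nil, Bool.or_false]
  rw [Bool.eq_iff_iff]
  simp only [Bool.or_eq_true, Bool.and_eq_true, beq_iff_eq, decide_eq_true_eq, Char.le_def,
    Char.ext_iff, UInt32.le_iff_toNat_le, ← UInt32.toNat_inj]
  norm_num
  simp only [show ('A' : Char).toNat = 65 from rfl, show ('B' : Char).toNat = 66 from rfl, show ('C' : Char).toNat = 67 from rfl, show ('D' : Char).toNat = 68 from rfl, show ('E' : Char).toNat = 69 from rfl, show ('F' : Char).toNat = 70 from rfl, show ('G' : Char).toNat = 71 from rfl, show ('H' : Char).toNat = 72 from rfl, show ('I' : Char).toNat = 73 from rfl, show ('J' : Char).toNat = 74 from rfl, show ('K' : Char).toNat = 75 from rfl, show ('L' : Char).toNat = 76 from rfl, show ('M' : Char).toNat = 77 from rfl, show ('N' : Char).toNat = 78 from rfl, show ('O' : Char).toNat = 79 from rfl, show ('P' : Char).toNat = 80 from rfl,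 show ('Q' : Char).toNat = 81 from rfl, show ('R' : Char).toNat = 82 from rfl, show ('S' : Char).toNat = 83 from rfl, show ('T' : Char).toNat = 84 from rfl, show ('U' : Char).toNat = 85 from rfl, show ('V' : Char).toNat = 86 from rfl, show ('W' : Char).toNat = 87 from rfl, show ('X' : Char).toNat = 88 from rfl, show ('Y' : Char).toNat = 89 from rfl, show ('Z' : Char).toNat = 90 from rfl, show ('a' : Char).toNat = 97 from rfl, show ('b' : Char).toNat = 98 from rfl, show ('c' : Char).toNat = 99 from rfl, show ('d' : Char).toNat = 100 from rfl, show ('e' : Char).toNat = 101 from rfl, show ('f' : Char).toNat = 102 from rfl, show ('g' : Char).toNat = 103 from rfl, show ('h' : Char).toNat = 104 from rfl, show ('i' : Char).toNat = 105 from rfl, show ('j' : Char).toNat = 106 from rfl, show ('k' : Char).toNat = 107 from rfl, show ('l' : Char).toNat = 108 from rfl, show ('m' : Char).toNat = 109 from rfl, show ('n' : Char).toNat = 110 from rfl, show ('o' : Char).toNat = 111 from rfl, show ('p' : Char).toNat = 112 from rfl, show ('q' : Char).toNat = 113 from rfl, show ('r' : Char).toNat = 114 from rfl, show ('s' : Char).toNat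 = 115 from rfl, show ('t' : Char).toNat = 116 from rfl, show ('u' : Char).toNat = 117 from rfl, show ('v' : Char).toNat = 118 from rfl, show ('w' : Char).toNat = 119 from rfl, show ('x' : Char).toNat = 120 from rfl, show ('y' : Char).toNat = 121 from rfl, show ('z' : Char).toNat = 122 from rfl, show ('_' : Char).toNat = 95 from rfl, show ('0' : Char).toNat = 48 from rfl, show ('1' : Char).toNat = 49 from rfl, show ('2' : Char).toNat = 50 from rfl, show ('3' : Char).toNat = 51 from rfl, show ('4' : Char).toNat = 52 from rfl, show ('5' : Char).toNat = 53 from rfl, show ('6' : Char).toNat = 54 from rfl, show ('7' : Char).toNat = 55 from rfl, show ('8' : Char).toNat = 56 from rfl, show ('9' : Char).toNat = 57 from rfl, show ('-' : Char).toNat = 45 from rfl]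
  omega

theorem pv_star_eq (cs : List Char) : cs.all (fun ch => pvRestChars.contains ch) = pvReStarRun cs := by
  induction cs with
  | nil => rfl
  | cons c cs ih =>
    have h : (List.all (c :: cs) fun ch => pvRestChars.contains ch)
        = (pvRestChars.contains c && cs.all fun ch => pvRestChars.contains ch) := List.all_cons ..
    rw [h, pv_rest_eq, ih]
    rfl

-- ===== VERDICT (by name: the statement is the Claim_ definition above) =====
theorem is_simple_identifier_py_spec : Claim_equal_is_simple_identifier_py := by
  intro value _
  unfold Spec_is_simple_identifier_py is_simple_identifier_py is_simple_identifier_py_alt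
  cases value.toList with
  | nil => rfl
  | cons c cs =>
    simp only [pv_first_eq, pv_star_eq]
    cases pvReFirstClass c <;> simp
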